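-- pv_equiv track=rewrite | github.com/Hercerthe/2110101-Comp-prog | Grader/09_MoreDC_xx/09_MoreDC_34.py | pattern6
-- ===== SOURCE A (Python) =====
-- def pattern6(N):
--     if N == 0 :
--         return []
--     x = []
--     s = 1
--     for i in range(N) :
--         x.append([])
--     for i in range(N) :
--         for e in range(i) :
--             x[i].append(0)
--     while len(x[0]) < N :
--         for i in range(N) :
--             if len(x[i]) < N :
--                 x[i].append(s)
--                 s += 1
--         for i in range(N-1,-1,-1) :
--             if len(x[i]) < N :
--                 x[i].append(s)
--                 s += 1
--     return x
-- ===== SOURCE B (Python) =====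
-- def pattern6(N):
--     x = [[0] * N for _ in range(N)]
--     s = 1
--     for d in range(N):
--         rows = range(N - d) if d % 2 == 0 else range(N - d - 1, -1, -1)
--         for i in rows:
--             x[i][i + d] = s
--             s += 1
--     return x
-- ===== Notes on version B (the rewrite author's own statement) =====
-- stated objective: simpler
-- what changed: B preallocates an NxN zero matrix and fills the upper-triangle anti-diagonals directly (ascending rows on even diagonals, descending on odd) with one counter, replacing A's append-built rows and while-loop of alternating forward/backward sweeps guarded by length checks.
import Mathlib
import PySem

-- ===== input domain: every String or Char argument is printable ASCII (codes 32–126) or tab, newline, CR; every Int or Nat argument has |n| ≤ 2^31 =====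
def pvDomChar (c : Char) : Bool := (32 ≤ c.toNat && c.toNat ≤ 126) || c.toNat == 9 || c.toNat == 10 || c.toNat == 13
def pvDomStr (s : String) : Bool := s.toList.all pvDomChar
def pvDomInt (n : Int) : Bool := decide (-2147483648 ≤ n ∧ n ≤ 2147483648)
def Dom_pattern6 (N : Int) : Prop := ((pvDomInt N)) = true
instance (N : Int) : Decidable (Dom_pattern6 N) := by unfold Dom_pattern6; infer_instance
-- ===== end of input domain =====

-- B replaces A's while-loop of alternating forward/backward append sweeps by a direct
-- anti-diagonal fill of a preallocated zero matrix (simpler decomposition, same cost).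
-- A mutates nothing observable; equivalence is about the return value.

-- ===== PORT A =====
-- forward sweep: for i in range(N): if len(x[i]) < N: x[i].append(s); s += 1
-- (transliterated as the obvious structural recursion over the row list, same state)
def pvFwd (N : Int) : List (List Int) → Int → List (List Int) × Int
  | [], s => ([], s)
  | r :: rs, s =>
    if (r.length : Int) < N then
      let p := pvFwd N rs (s + 1)
      ((r ++ [s]) :: p.1, p.2)
    else
      let p := pvFwd N rs s
      (r :: p.1, p.2)

-- backward sweep: for i in range(N-1,-1,-1): … (tail processed first, counter threads bottom-up)
def pvBwd (N : Int) : List (List Int) → Int → List (List Int) × Int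
  | [], s => ([], s)
  | r :: rs, s =>
    let p := pvBwd N rs s
    if (r.length : Int) < N then ((r ++ [p.2]) :: p.1, p.2 + 1)
    else (r :: p.1, p.2)

-- while len(x[0]) < N: … — fuel-bounded (fuel = N.toNat suffices: each iteration grows row 0)
def pvLoop (N : Int) : Nat → List (List Int) → Int → List (List Int)
  | 0, x, _ => x
  | fuel + 1, x, s =>
    if ((x.headD []).length : Int) < N then
      let p1 := pvFwd N x s
      let p2 := pvBwd N p1.1 p1.2
      pvLoop N fuel p2.1 p2.2
    else x

def pattern6 (N : Int) : List (List Int) :=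
  if N = 0 then []
  else
    -- for i in range(N): x.append([])
    let x0 := (List.range N.toNat).foldl (fun x _ => x ++ [([] : List Int)]) []
    -- for i in range(N): for e in range(i): x[i].append(0)
    let x1 := (List.range N.toNat).foldl
      (fun x i => x.set i ((List.range i).foldl (fun r _ => r ++ [(0 : Int)]) (x.getD i []))) x0
    pvLoop N N.toNat x1 1

-- ===== PORT B =====
-- x[i][i+d] = s; s += 1
def pvBStep (d : Nat) (q : List (List Int) × Int) (i : Nat) : List (List Int) × Int :=
  (q.1.set i ((q.1.getD i []).set (i + d) q.2), q.2 + 1)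

-- one diagonal: rows ascending when d is even, descending when d is odd
def pvBDiag (n : Nat) (q : List (List Int) × Int) (d : Nat) : List (List Int) × Int :=
  (if d % 2 = 0 then List.range (n - d) else (List.range (n - d)).reverse).foldl (pvBStep d) q

def pattern6_alt (N : Int) : List (List Int) :=
  ((List.range N.toNat).foldl (pvBDiag N.toNat)
    (List.replicate N.toNat (List.replicate N.toNat (0 : Int)), 1)).1

-- ===== PRECONDITION & SPEC =====
-- Pre_ excludes N < 0, on which A raises IndexError (x[0] on the empty row list).
def Pre_pattern6 (N : Int) : Prop := 0 ≤ N
instance (N : Int) : Decidable (Pre_pattern6 N) := by unfold Pre_pattern6; infer_instance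
def pvWitness_pattern6 : Int := (4)

def Spec_pattern6 (N : Int) (out : List (List Int)) : Prop := out = pattern6_alt N
instance (N : Int) (out : List (List Int)) : Decidable (Spec_pattern6 N out) := by unfold Spec_pattern6; infer_instance

-- ===== CLAIM (what is proved, stated in full; the proofs are below) =====
def Claim_equal_pattern6 : Prop := ∀ (N : Int), Dom_pattern6 N → Pre_pattern6 N → Spec_pattern6 N (pattern6 N)

-- ===== LEMMAS AND PROOFS =====

-- counter value at the start of diagonal d (1 + number of cells on diagonals 0..d-1)
def sdiag (n d : Nat) : Nat := 1 + ((List.range d).map (fun k => n - k)).sum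

-- value written at row i of diagonal d
def cellVal (n d i : Nat) : Int :=
  ((sdiag n d + (if d % 2 = 0 then i else n - 1 - d - i) : Nat) : Int)

-- row i after diagonals 0..d-1 have been filled (A's growing-row view)
def rowA (n d i : Nat) : List Int :=
  List.replicate i 0 ++ (List.range (min d (n - i))).map (fun k => cellVal n k i)

def stateA (n d : Nat) : List (List Int) := (List.range n).map (rowA n d)

-- B's view of the same state: rows padded with zeros to length n
def rowB (n d i : Nat) : List Int := rowA n d i ++ List.replicate (n - (i + min d (n - i))) 0

def stateB (n d : Nat) : List (List Int) := (List.range n).map (rowB n d)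

theorem rowA_length (n d i : Nat) : (rowA n d i).length = i + min d (n - i) := by
  simp [rowA]

theorem sdiag_succ (n d : Nat) : sdiag n (d + 1) = sdiag n d + (n - d) := by
  simp [sdiag, List.range_succ]; omega

theorem rowA_stab (n d d' i : Nat) (h : n ≤ d) (h' : n ≤ d') (hi : i ≤ n) :
    rowA n d i = rowA n d' i := by
  unfold rowA
  have : min d (n - i) = n - i := by omega
  have : min d' (n - i) = n - i := by omega
  simp_all

theorem stateA_stab (n d : Nat) (h : n ≤ d) : stateA n d = stateA n n := by
  unfold stateA
  refine List.map_congr_left (fun i hi => ?_)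
  exact rowA_stab n d n i h le_rfl (by simp at hi; omega)

theorem rowB_stab (n d i : Nat) (h : n ≤ i + d) (hi : i ≤ n) :
    rowB n (d + 1) i = rowB n d i := by
  unfold rowB rowA
  have h1 : min d (n - i) = n - i := by omega
  have h2 : min (d + 1) (n - i) = n - i := by omega
  simp [h1, h2]

-- generic: set on a map over range
theorem map_range_set (n j : Nat) (f g : Nat → List Int) (v : List Int) (_hj : j < n)
    (hv : g j = v) (h : ∀ i, i < n → i ≠ j → f i = g i) :
    ((List.range n).map f).set j v = (List.range n).map g := by
  apply List.ext_getElem (by simp)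
  intro i h1 h2
  have hi : i < n := by simpa using h2
  simp only [List.getElem_set, List.getElem_map, List.getElem_range]
  by_cases hij : i = j
  · simp [hij, hv]
  · simp [h i hi hij]
    intro hji; exact absurd hji.symm hij

theorem map_range_getD (n j : Nat) (f : Nat → List Int) (hj : j < n) :
    ((List.range n).map f).getD j [] = f j := by
  rw [List.getD_eq_getElem _ _ (by simpa using hj)]
  simp

-- ===== A-side: the two sweeps each fill one diagonal =====

theorem fwd_gen (n d : Nat) (hd : d % 2 = 0) :
    ∀ m a, a + m = n →
      pvFwd (n : Int) ((List.range' a m).map (rowA n d))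
          ((sdiag n d + min a (n - d) : Nat) : Int)
        = ((List.range' a m).map (rowA n (d + 1)),
           ((sdiag n d + min (a + m) (n - d) : Nat) : Int)) := by
  intro m
  induction m with
  | zero => intro a ha; simp [pvFwd]
  | succ m ih =>
    intro a ha
    rw [List.range'_succ]
    simp only [List.map_cons, pvFwd]
    have hlen : ((rowA n d a).length : Int) = (a + min d (n - a) : Nat) := by
      rw [rowA_length]
    by_cases hcase : a + d < n
    · have hmin : min d (n - a) = d := by omega
      have hcond : ((rowA n d a).length : Int) < (n : Int) := by
        rw [hlen, hmin]; exact_mod_cast hcase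
      rw [if_pos hcond]
      have hmina : min a (n - d) = a := by omega
      have hs1 : ((sdiag n d + min a (n - d) : Nat) : Int) + 1
          = ((sdiag n d + min (a + 1) (n - d) : Nat) : Int) := by
        have : min (a + 1) (n - d) = a + 1 := by omega
        rw [hmina, this]; push_cast; ring
      have hm2 : a + 1 + m = a + (m + 1) := by omega
      rw [hs1, ih (a + 1) (by omega), hm2]
      have hrow : rowA n d a ++ [((sdiag n d + min a (n - d) : Nat) : Int)]
          = rowA n (d + 1) a := by
        unfold rowA
        have h1 : min (d + 1) (n - a) = d + 1 := by omega
        rw [hmin, h1, List.range_succ, List.map_append, ← List.append_assoc]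
        simp [cellVal, hd, hmina]
      rw [hrow]
    · have hmin : min d (n - a) = n - a := by omega
      have hcond : ¬ ((rowA n d a).length : Int) < (n : Int) := by
        rw [hlen, hmin]
        have : a + (n - a) = n := by omega
        rw [this]; omega
      rw [if_neg hcond]
      have hrow : rowA n d a = rowA n (d + 1) a := by
        unfold rowA
        have h1 : min (d + 1) (n - a) = n - a := by omega
        rw [hmin, h1]
      have hmins : min a (n - d) = min (a + 1) (n - d) := by omega
      have hm2 : a + 1 + m = a + (m + 1) := by omega
      rw [hmins, ih (a + 1) (by omega), hm2, hrow]

theorem bwd_gen (n d : Nat) (hd : d % 2 = 1) :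
    ∀ m, m ≤ n →
      pvBwd (n : Int) ((List.range' (n - m) m).map (rowA n d)) ((sdiag n d : Nat) : Int)
        = ((List.range' (n - m) m).map (rowA n (d + 1)),
           ((sdiag n d + ((n - d) - min (n - m) (n - d)) : Nat) : Int)) := by
  intro m
  induction m with
  | zero => intro _; simp [pvBwd]
  | succ m ih =>
    intro hm
    have ha : n - (m + 1) + 1 = n - m := by omega
    rw [List.range'_succ, ha]
    simp only [List.map_cons, pvBwd]
    rw [ih (by omega)]
    set a := n - (m + 1) with hadef
    have hlen : ((rowA n d a).length : Int) = (a + min d (n - a) : Nat) := by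
      rw [rowA_length]
    by_cases hcase : a + d < n
    · have hmin : min d (n - a) = d := by omega
      have hcond : ((rowA n d a).length : Int) < (n : Int) := by
        rw [hlen, hmin]; exact_mod_cast hcase
      rw [if_pos hcond]
      have hminm : min (n - m) (n - d) = n - m := by omega
      have hmina : min a (n - d) = a := by omega
      have hrow : rowA n d a ++ [((sdiag n d + ((n - d) - (n - m)) : Nat) : Int)]
          = rowA n (d + 1) a := by
        unfold rowA
        have h1 : min (d + 1) (n - a) = d + 1 := by omega
        rw [hmin, h1, List.range_succ, List.map_append, ← List.append_assoc]
        have hv : n - 1 - d - a = (n - d) - (n - m) := by omega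
        simp [cellVal, hd, hv]
      have hs : (((sdiag n d + ((n - d) - min (n - m) (n - d))) : Nat) : Int) + 1
          = ((sdiag n d + ((n - d) - min a (n - d)) : Nat) : Int) := by
        rw [hminm, hmina]; omega
      rw [hs]; dsimp only; rw [hminm, hrow]
    · have hmin : min d (n - a) = n - a := by omega
      have hcond : ¬ ((rowA n d a).length : Int) < (n : Int) := by
        rw [hlen, hmin]
        have : a + (n - a) = n := by omega
        rw [this]; omega
      rw [if_neg hcond]
      have hrow : rowA n d a = rowA n (d + 1) a := by
        unfold rowA
        have h1 : min (d + 1) (n - a) = n - a := by omega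
        rw [hmin, h1]
      have hmins : min (n - m) (n - d) = min a (n - d) := by omega
      rw [hrow, hmins]

theorem loop_lemma (n : Nat) (hn : 0 < n) :
    ∀ fuel d, d % 2 = 0 → n ≤ d + 2 * fuel →
      pvLoop (n : Int) fuel (stateA n d) ((sdiag n d : Nat) : Int) = stateA n n := by
  intro fuel
  induction fuel with
  | zero =>
    intro d hd hfuel
    simp only [pvLoop]
    exact stateA_stab n d (by omega)
  | succ fuel ih =>
    intro d hd hfuel
    simp only [pvLoop]
    have hhead : (stateA n d).headD [] = rowA n d 0 := by
      unfold stateA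
      cases n with
      | zero => omega
      | succ k => rw [List.range_succ_eq_map]; simp
    by_cases hdn : d < n
    · have hcond : (((stateA n d).headD []).length : Int) < (n : Int) := by
        rw [hhead, rowA_length]
        have : min d (n - 0) = d := by omega
        rw [this]; push_cast; omega
      rw [if_pos hcond]
      have hfwd := fwd_gen n d hd n 0 (by omega)
      rw [← List.range_eq_range'] at hfwd
      have e1 : sdiag n d + min 0 (n - d) = sdiag n d := by omega
      have e2 : sdiag n d + min (0 + n) (n - d) = sdiag n (d + 1) := by
        rw [sdiag_succ]; omega
      rw [e1, e2] at hfwd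
      have hbwd := bwd_gen n (d + 1) (by omega) n le_rfl
      rw [Nat.sub_self, ← List.range_eq_range'] at hbwd
      have e3 : sdiag n (d + 1) + ((n - (d + 1)) - min 0 (n - (d + 1))) = sdiag n ((d + 1) + 1) := by
        have h := sdiag_succ n (d + 1); omega
      rw [e3] at hbwd
      show pvLoop (n : Int) fuel
          (pvBwd (n : Int) (pvFwd (n : Int) (stateA n d) _).1 (pvFwd (n : Int) (stateA n d) _).2).1
          (pvBwd (n : Int) (pvFwd (n : Int) (stateA n d) _).1 (pvFwd (n : Int) (stateA n d) _).2).2 = _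
      unfold stateA
      rw [hfwd]
      dsimp only
      rw [hbwd]
      have hp : (d + 2) % 2 = 0 := by omega
      have hf : n ≤ (d + 2) + 2 * fuel := by omega
      exact ih (d + 2) hp hf
    · have hcond : ¬ (((stateA n d).headD []).length : Int) < (n : Int) := by
        rw [hhead, rowA_length]
        have : min d (n - 0) = n := by omega
        rw [this]; push_cast; omega
      rw [if_neg hcond]
      exact stateA_stab n d (by omega)

-- A's initialisation builds exactly stateA n 0
theorem initA (n : Nat) :
    (List.range n).foldl
      (fun x i => x.set i ((List.range i).foldl (fun r _ => r ++ [(0 : Int)]) (x.getD i [])))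
      ((List.range n).foldl (fun x _ => x ++ [([] : List Int)]) [])
    = stateA n 0 := by
  have hx0 : (List.range n).foldl (fun x _ => x ++ [([] : List Int)]) []
      = (List.range n).map (fun _ => ([] : List Int)) := by
    simp [PySem.List.foldl_append_singleton_eq_map (f := fun _ : Nat => ([] : List Int))
      (acc := []) (l := List.range n)]
  have key : ∀ m j, j + m = n →
      (List.range' j m).foldl
        (fun x i => x.set i ((List.range i).foldl (fun r _ => r ++ [(0 : Int)]) (x.getD i [])))
        ((List.range n).map (fun i => if i < j then List.replicate i (0 : Int) else []))
      = (List.range n).map (fun i => if i < n then List.replicate i (0 : Int) else []) := by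
    intro m
    induction m with
    | zero => intro j hj; subst hj; simp
    | succ m ih =>
      intro j hj
      rw [List.range'_succ, List.foldl_cons]
      have hget : ((List.range n).map (fun i => if i < j then List.replicate i (0 : Int) else [])).getD j []
          = [] := by
        rw [map_range_getD n j _ (by omega)]; simp
      rw [hget]
      have hinner : (List.range j).foldl (fun r _ => r ++ [(0 : Int)]) ([] : List Int)
          = List.replicate j (0 : Int) := by
        rw [PySem.List.foldl_append_singleton_eq_map (f := fun _ : Nat => (0 : Int))]
        simp [List.map_const']
      rw [hinner, map_range_set n j _ (fun i => if i < j + 1 then List.replicate i (0 : Int) else [])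
        _ (by omega) (by simp) (fun i hi hij => by simp [show (i < j) = (i < j + 1) from by
          simp only [eq_iff_iff]; omega])]
      exact ih (j + 1) (by omega)
  have h0 := key n 0 (by omega)
  rw [← List.range_eq_range'] at h0
  have : (List.range n).map (fun i => if i < 0 then List.replicate i (0 : Int) else [])
      = (List.range n).map (fun _ => ([] : List Int)) := by simp
  rw [this] at h0
  rw [hx0, h0]
  unfold stateA rowA
  refine List.map_congr_left (fun i hi => ?_)
  simp at hi
  simp [hi]

-- setting cell (j, j+d) of a padded row fills diagonal d there
theorem row_set (n d j : Nat) (h : j + d < n) :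
    (rowB n d j).set (j + d) (cellVal n d j) = rowB n (d + 1) j := by
  unfold rowB rowA
  have h1 : min d (n - j) = d := by omega
  have h2 : min (d + 1) (n - j) = d + 1 := by omega
  rw [h1, h2]
  have hlen : (List.replicate j (0 : Int) ++ (List.range d).map (fun k => cellVal n k j)).length
      = j + d := by simp
  rw [← hlen, List.set_append_right _ _ le_rfl, Nat.sub_self, hlen]
  have hrep : n - (j + d) = (n - (j + (d + 1))) + 1 := by omega
  rw [hrep, List.replicate_succ, List.set_cons_zero]
  rw [List.range_succ, List.map_append]
  simp [List.append_assoc]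

-- ascending inner fold (even diagonal)
theorem inner_asc (n d : Nat) (hd : d % 2 = 0) (hdn : d < n) :
    ∀ m j, j + m = n - d →
      (List.range' j m).foldl (pvBStep d)
        ((List.range n).map (fun i => if i < j then rowB n (d + 1) i else rowB n d i),
         ((sdiag n d + j : Nat) : Int))
      = ((List.range n).map (fun i => if i < n - d then rowB n (d + 1) i else rowB n d i),
         ((sdiag n d + (n - d) : Nat) : Int)) := by
  intro m
  induction m with
  | zero =>
    intro j hj
    simp only [List.range', List.foldl_nil]
    rw [show j = n - d from by omega]
  | succ m ih =>
    intro j hj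
    rw [List.range'_succ, List.foldl_cons]
    have hjn : j < n := by omega
    show (List.range' (j + 1) m).foldl (pvBStep d)
        (pvBStep d (_, ((sdiag n d + j : Nat) : Int)) j) = _
    unfold pvBStep
    dsimp only
    rw [map_range_getD n j _ hjn]
    rw [if_neg (by omega)]
    have hs : ((sdiag n d + j : Nat) : Int) = cellVal n d j := by
      simp [cellVal, hd]
    rw [hs, row_set n d j (by omega)]
    rw [map_range_set n j _ (fun i => if i < j + 1 then rowB n (d + 1) i else rowB n d i)
      _ hjn (by simp) (fun i hi hij => by
        simp [show (i < j) = (i < j + 1) from by simp only [eq_iff_iff]; omega])]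
    have hs1 : cellVal n d j + 1 = ((sdiag n d + (j + 1) : Nat) : Int) := by
      rw [← hs]; omega
    rw [hs1]
    exact ih (j + 1) (by omega)

-- descending inner fold (odd diagonal)
theorem inner_desc (n d : Nat) (hd : d % 2 = 1) (hdn : d < n) :
    ∀ m, m ≤ n - d →
      ((List.range m).reverse).foldl (pvBStep d)
        ((List.range n).map (fun i => if m ≤ i then rowB n (d + 1) i else rowB n d i),
         ((sdiag n d + ((n - d) - m) : Nat) : Int))
      = ((List.range n).map (fun i => if 0 ≤ i then rowB n (d + 1) i else rowB n d i),
         ((sdiag n d + (n - d) : Nat) : Int)) := by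
  intro m
  induction m with
  | zero => intro _; simp
  | succ m ih =>
    intro hm
    rw [show (List.range (m + 1)).reverse = m :: (List.range m).reverse from by
      simp [List.range_succ], List.foldl_cons]
    have hmn : m < n := by omega
    show ((List.range m).reverse).foldl (pvBStep d)
        (pvBStep d (_, ((sdiag n d + ((n - d) - (m + 1)) : Nat) : Int)) m) = _
    unfold pvBStep
    dsimp only
    rw [map_range_getD n m _ hmn]
    rw [if_neg (by omega)]
    have hs : ((sdiag n d + ((n - d) - (m + 1)) : Nat) : Int) = cellVal n d m := by
      simp only [cellVal, hd]
      norm_num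
      omega
    rw [hs, row_set n d m (by omega)]
    rw [map_range_set n m _ (fun i => if m ≤ i then rowB n (d + 1) i else rowB n d i)
      _ hmn (by simp) (fun i hi hij => by
        simp [show (m + 1 ≤ i) = (m ≤ i) from by simp only [eq_iff_iff]; omega])]
    have hs1 : cellVal n d m + 1 = ((sdiag n d + ((n - d) - m) : Nat) : Int) := by
      rw [← hs]; omega
    rw [hs1]
    exact ih (by omega)

theorem stateB_zero_mix (n d : Nat) (j : Nat) (hj : j = 0) :
    (List.range n).map (fun i => if i < j then rowB n (d + 1) i else rowB n d i) = stateB n d := by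
  subst hj; simp [stateB]

-- B's outer fold over diagonals d .. n-1
theorem outerB (n : Nat) :
    ∀ m d, d + m = n →
      (List.range' d m).foldl (pvBDiag n) (stateB n d, ((sdiag n d : Nat) : Int))
      = (stateB n n, ((sdiag n n : Nat) : Int)) := by
  intro m
  induction m with
  | zero => intro d hd; subst hd; simp
  | succ m ih =>
    intro d hd
    rw [List.range'_succ, List.foldl_cons]
    have hdn : d < n := by omega
    have hstep : pvBDiag n (stateB n d, ((sdiag n d : Nat) : Int)) d
        = (stateB n (d + 1), ((sdiag n (d + 1) : Nat) : Int)) := by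
      unfold pvBDiag
      have hfull : (List.range n).map (fun i => if i < n - d then rowB n (d + 1) i else rowB n d i)
          = stateB n (d + 1) := by
        unfold stateB
        refine List.map_congr_left (fun i hi => ?_)
        simp only [List.mem_range] at hi
        by_cases hc : i < n - d
        · simp [hc]
        · rw [if_neg hc, rowB_stab n d i (by omega) (by omega)]
      have hfull' : (List.range n).map (fun i => if 0 ≤ i then rowB n (d + 1) i else rowB n d i)
          = stateB n (d + 1) := by
        unfold stateB
        refine List.map_congr_left (fun i hi => by simp)
      by_cases hpar : d % 2 = 0
      · rw [if_pos hpar, List.range_eq_range']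
        have h := inner_asc n d hpar hdn (n - d) 0 (by omega)
        rw [stateB_zero_mix n d 0 rfl] at h
        rw [show ((sdiag n d : Nat) : Int) = ((sdiag n d + 0 : Nat) : Int) from by omega, h,
          hfull, sdiag_succ]
      · rw [if_neg hpar]
        have hd1 : d % 2 = 1 := by omega
        have h := inner_desc n d hd1 hdn (n - d) le_rfl
        have hmix : (List.range n).map (fun i => if n - d ≤ i then rowB n (d + 1) i else rowB n d i)
            = stateB n d := by
          unfold stateB
          refine List.map_congr_left (fun i hi => ?_)
          simp only [List.mem_range] at hi
          by_cases hc : n - d ≤ i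
          · rw [if_pos hc, rowB_stab n d i (by omega) (by omega)]
          · rw [if_neg hc]
        rw [hmix, Nat.sub_self] at h
        rw [show ((sdiag n d : Nat) : Int) = ((sdiag n d + 0 : Nat) : Int) from by omega, h,
          hfull', sdiag_succ]
    rw [hstep]
    exact ih (d + 1) (by omega)

theorem stateB_init (n : Nat) :
    stateB n 0 = List.replicate n (List.replicate n (0 : Int)) := by
  unfold stateB rowB rowA
  have : ∀ i, i < n → List.replicate i (0 : Int) ++
      (List.range (min 0 (n - i))).map (fun k => cellVal n k i) ++
      List.replicate (n - (i + min 0 (n - i))) 0 = List.replicate n (0 : Int) := by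
    intro i hi
    have h0 : min 0 (n - i) = 0 := by omega
    simp only [h0, List.range_zero, List.map_nil, List.append_nil, Nat.add_zero]
    rw [List.replicate_append_replicate, show i + (n - i) = n from by omega]
  calc (List.range n).map _ = (List.range n).map (fun _ => List.replicate n (0 : Int)) :=
        List.map_congr_left (fun i hi => this i (by simpa using hi))
    _ = _ := by simp [List.map_const']

theorem stateB_final (n : Nat) : stateB n n = stateA n n := by
  unfold stateB stateA
  refine List.map_congr_left (fun i hi => ?_)
  simp only [List.mem_range] at hi
  unfold rowB
  simp [show n - (i + (n - i)) = 0 from by omega]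

theorem alt_eq_stateA (n : Nat) : pattern6_alt (n : Int) = stateA n n := by
  unfold pattern6_alt
  rw [Int.toNat_natCast, List.range_eq_range']
  have h := outerB n n 0 (by omega)
  rw [stateB_init n] at h
  rw [show ((1 : Int)) = ((sdiag n 0 : Nat) : Int) from by simp [sdiag], h, stateB_final]

-- ===== VERDICT (by name: the statement is the Claim_ definition above) =====
theorem pattern6_spec : Claim_equal_pattern6 := by
  intro N _ hpre
  unfold Spec_pattern6
  unfold Pre_pattern6 at hpre
  by_cases h0 : N = 0
  · subst h0
    simp [pattern6, pattern6_alt]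
  · have hN : ((N.toNat : Nat) : Int) = N := Int.toNat_of_nonneg hpre
    set n := N.toNat with hn
    have hnpos : 0 < n := by omega
    rw [← hN]
    unfold pattern6
    rw [if_neg (by omega), Int.toNat_natCast]
    show pvLoop (n : Int) n
        ((List.range n).foldl
          (fun x i => x.set i ((List.range i).foldl (fun r _ => r ++ [(0 : Int)]) (x.getD i [])))
          ((List.range n).foldl (fun x _ => x ++ [([] : List Int)]) [])) 1 = _
    rw [initA n]
    rw [show ((1 : Int)) = ((sdiag n 0 : Nat) : Int) from by simp [sdiag]]
    rw [loop_lemma n hnpos n 0 rfl (by omega), alt_eq_stateA]
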